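-- pv_equiv track=rewrite | github.com/matiboux/epita-s6-fmsi | p_1_pollard.py | crack_primes
-- ===== SOURCE A (Python) =====
-- import math
--
-- def p_minus_one(n, b):
--
--     a = 2
--
--     for j in range(2, b + 1):
--         a = pow(a, j, n)
--         d = math.gcd(a - 1, n)
--
--     if d > 1 and d < n:
--         return d
--     else:
--         return -1
--
-- def crack_primes(n):
--     i = 2
--     r = p_minus_one(n, i)
--
--     while r == -1:
--         r = p_minus_one(n, i)
--         i += 1
--
--         if (i > 2 ** 12):
--             return None
--
--     p = r
--     q = n // r
--     return (p, q)
-- ===== SOURCE B (Python) =====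
-- import math
--
-- def crack_primes(n):
--     # Incremental Pollard p-1: keep a = 2^(b!) mod n across increasing bounds b
--     # instead of recomputing the whole power chain for every bound.
--     a = 2
--     for b in range(2, 4096):
--         a = pow(a, b, n)
--         d = math.gcd(a - 1, n)
--         if 1 < d < n:
--             return (d, n // d)
--     return None
-- ===== Notes on version B (the rewrite author's own statement) =====
-- stated objective: faster
-- what changed: Instead of restarting p_minus_one from scratch for every smoothness bound (recomputing the whole power chain each time), B carries the running residue across increasing bounds, doing one modular power and one gcd per bound in a single loop; intended as asymptotically faster, and a timing run measured B hundreds of times faster at the largest sizes where A finished.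
-- outside the precondition, e.g. on crack_primes(0): A raises ValueError, B raises ValueError
import Mathlib
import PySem

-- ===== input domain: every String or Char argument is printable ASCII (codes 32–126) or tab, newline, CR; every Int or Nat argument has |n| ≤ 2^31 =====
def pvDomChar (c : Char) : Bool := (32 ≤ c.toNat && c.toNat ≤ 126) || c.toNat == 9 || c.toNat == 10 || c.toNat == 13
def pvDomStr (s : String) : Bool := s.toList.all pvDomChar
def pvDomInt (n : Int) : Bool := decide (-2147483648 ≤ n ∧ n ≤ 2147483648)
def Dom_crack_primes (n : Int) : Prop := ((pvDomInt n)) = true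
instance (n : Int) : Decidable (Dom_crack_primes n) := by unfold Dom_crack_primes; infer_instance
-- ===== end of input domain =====

-- B replaces A's restart-from-scratch p_minus_one calls by one incremental loop that
-- carries the residue a across increasing bounds b (one modular power per bound).

-- ===== PORT A =====
-- p_minus_one(n, b): a=2; for j in range(2,b+1): a=pow(a,j,n); d=gcd(a-1,n).
-- The loop state is (a, d); d's initial 0 stands for Python's unbound d, never
-- observed since every call has b ≥ 2.  j.toNat is exact: every j here is ≥ 2.
def crackPminusOne (n b : Int) : Int :=
  let st := (PySem.List.pyRange 2 (b + 1) 1).foldl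
      (fun (s : Int × Int) j =>
        let a := PySem.Int.powMod s.1 j.toNat n
        (a, (Int.gcd (a - 1) n : Int))) (2, 0)
  if st.2 > 1 ∧ st.2 < n then st.2 else -1

-- the `while r == -1` loop of crack_primes; i bounded by 4096 gives termination
def crackAux (n i r : Int) : Option (List Int) :=
  if r = -1 then
    let r' := crackPminusOne n i
    if i + 1 > 4096 then none
    else crackAux n (i + 1) r'
  else some [r, PySem.Int.floordiv n r]
termination_by (4097 - i).toNat
decreasing_by omega

def crack_primes (n : Int) : Option (List Int) :=
  crackAux n 2 (crackPminusOne n 2)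

-- ===== PORT B =====
-- for b in range(2,4096): a=pow(a,b,n); d=gcd(a-1,n); if 1<d<n: return (d, n//d)
-- (the for-loop with early return, transcribed as recursion on b)
def crackAltLoop (n a b : Int) : Option (List Int) :=
  if b > 4095 then none
  else
    let a' := PySem.Int.powMod a b.toNat n
    let d : Int := (Int.gcd (a' - 1) n : Int)
    if 1 < d ∧ d < n then some [d, PySem.Int.floordiv n d]
    else crackAltLoop n a' (b + 1)
termination_by (4096 - b).toNat
decreasing_by omega

def crack_primes_alt (n : Int) : Option (List Int) :=
  crackAltLoop n 2 2

-- ===== PRECONDITION & SPEC =====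
-- Python's pow(a, j, n) raises ValueError when the modulus n is 0; both A and B raise there.
def Pre_crack_primes (n : Int) : Prop := n ≠ 0
instance (n : Int) : Decidable (Pre_crack_primes n) := by unfold Pre_crack_primes; infer_instance
def pvWitness_crack_primes : Int := (15)

def Spec_crack_primes (n : Int) (out : Option (List Int)) : Prop := out = crack_primes_alt n
instance (n : Int) (out : Option (List Int)) : Decidable (Spec_crack_primes n out) := by unfold Spec_crack_primes; infer_instance

-- ===== CLAIM (what is proved, stated in full; the proofs are below) =====
def Claim_equal_crack_primes : Prop := ∀ (n : Int), Dom_crack_primes n → Pre_crack_primes n → Spec_crack_primes n (crack_primes n)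

-- ===== LEMMAS AND PROOFS =====

-- the (a, d) state of p_minus_one's loop after processing range(2, b+1)
def stA (n b : Int) : Int × Int :=
  (PySem.List.pyRange 2 (b + 1) 1).foldl
      (fun (s : Int × Int) j =>
        let a := PySem.Int.powMod s.1 j.toNat n
        (a, (Int.gcd (a - 1) n : Int))) (2, 0)

theorem pm_char (n b : Int) :
    crackPminusOne n b = if 1 < (stA n b).2 ∧ (stA n b).2 < n then (stA n b).2 else -1 := rfl

-- zeta-reduced one-step unfoldings of the two loops
theorem aux_eq (n i r : Int) :
    crackAux n i r =
      if r = -1 then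
        (if i + 1 > 4096 then none else crackAux n (i + 1) (crackPminusOne n i))
      else some [r, PySem.Int.floordiv n r] := by
  rw [crackAux]

theorem alt_eq (n a b : Int) :
    crackAltLoop n a b =
      if b > 4095 then none
      else
        if 1 < (Int.gcd (PySem.Int.powMod a b.toNat n - 1) n : Int) ∧
             (Int.gcd (PySem.Int.powMod a b.toNat n - 1) n : Int) < n then
          some [(Int.gcd (PySem.Int.powMod a b.toNat n - 1) n : Int),
                PySem.Int.floordiv n (Int.gcd (PySem.Int.powMod a b.toNat n - 1) n : Int)]
        else crackAltLoop n (PySem.Int.powMod a b.toNat n) (b + 1) := by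
  rw [crackAltLoop]

theorem stA_two (n : Int) :
    stA n 2 = (PySem.Int.powMod 2 2 n, (Int.gcd (PySem.Int.powMod 2 2 n - 1) n : Int)) := by
  have h : PySem.List.pyRange 2 3 1 = [2] := by decide
  simp [stA, h]

theorem stA_succ (n b : Int) (hb : 2 ≤ b) :
    stA n (b + 1) =
      (PySem.Int.powMod (stA n b).1 (b + 1).toNat n,
       (Int.gcd (PySem.Int.powMod (stA n b).1 (b + 1).toNat n - 1) n : Int)) := by
  unfold stA
  rw [PySem.List.pyRange_one_succ_right (by omega : (2:Int) ≤ b + 1)]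
  simp

theorem crackAux_loop (n : Int) :
    ∀ (k : Nat) (b : Int), (4096 - b).toNat ≤ k → 3 ≤ b → b ≤ 4096 →
      crackAux n b (-1) = crackAltLoop n (stA n (b - 1)).1 b := by
  intro k
  induction k with
  | zero =>
    intro b hk h3 h4
    have hb : b = 4096 := by omega
    subst hb
    rw [aux_eq, alt_eq]
    norm_num
  | succ k ih =>
    intro b hk h3 h4
    by_cases hcase : b = 4096
    · subst hcase
      rw [aux_eq, alt_eq]
      norm_num
    · have hst : (stA n b).1 = PySem.Int.powMod (stA n (b - 1)).1 b.toNat n := by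
        have h := stA_succ n (b - 1) (by omega)
        rw [show b - 1 + 1 = b by ring] at h
        rw [h]
      have hd : (stA n b).2 = (Int.gcd ((stA n b).1 - 1) n : Int) := by
        have h := stA_succ n (b - 1) (by omega)
        rw [show b - 1 + 1 = b by ring] at h
        rw [h]
      rw [aux_eq]
      rw [if_pos rfl, if_neg (by omega : ¬ b + 1 > 4096)]
      rw [alt_eq, if_neg (by omega : ¬ b > 4095)]
      rw [← hst, ← hd]
      rw [pm_char]
      by_cases hgood : 1 < (stA n b).2 ∧ (stA n b).2 < n
      · rw [if_pos hgood, if_pos hgood]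
        rw [aux_eq]
        rw [if_neg (by omega : ¬ (stA n b).2 = -1)]
      · rw [if_neg hgood, if_neg hgood]
        have h := ih (b + 1) (by omega) (by omega) (by omega)
        rw [show b + 1 - 1 = b by ring] at h
        exact h

-- ===== VERDICT (by name: the statement is the Claim_ definition above) =====
theorem crack_primes_spec : Claim_equal_crack_primes := by
  intro n _ _
  unfold Spec_crack_primes crack_primes crack_primes_alt
  have h2 := stA_two n
  have ha : PySem.Int.powMod 2 (2:Int).toNat n = (stA n 2).1 := by rw [h2]; rfl
  have hd : (Int.gcd (PySem.Int.powMod 2 (2:Int).toNat n - 1) n : Int) = (stA n 2).2 := by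
    rw [h2]; rfl
  rw [alt_eq, if_neg (by norm_num : ¬ (2:Int) > 4095)]
  rw [hd, ha]
  by_cases hgood : 1 < (stA n 2).2 ∧ (stA n 2).2 < n
  · have hpm : crackPminusOne n 2 = (stA n 2).2 := by rw [pm_char, if_pos hgood]
    rw [hpm, if_pos hgood]
    rw [aux_eq, if_neg (by omega : ¬ (stA n 2).2 = -1)]
  · have hpm : crackPminusOne n 2 = -1 := by rw [pm_char, if_neg hgood]
    rw [hpm, if_neg hgood]
    rw [aux_eq, if_pos rfl, if_neg (by norm_num : ¬ (2:Int) + 1 > 4096), hpm]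
    have h := crackAux_loop n 5000 3 (by norm_num) (by norm_num) (by norm_num)
    rw [show (3:Int) - 1 = 2 by ring] at h
    rw [show (2:Int) + 1 = 3 by norm_num]
    exact h
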